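-- pv_equiv track=rewrite | github.com/Dohyun-Kimm/TIL | Python/BOJ_2578.py | col_search
-- ===== SOURCE A (Python) =====
-- def col_search(c_mat):
--     col_bingo = 0
--     for c in range(len(c_mat)):
--         col_cnt = 0
--         for cr in range(len(c_mat)):
--             # 만약 빙고판에 -1이 적혀있다면 호명된 번호의 위치임으로 카운트해줌
--             if c_mat[cr][c] == -1:
--                 col_cnt += 1
--         # 한 열이 전부다 호명된것이라면 카운트는 5가 되어야한다.
--         # 빙고하나가 완성 되었다는 의미
--         if col_cnt == 5:
--             col_bingo += 1
--     # 빙고의 수르 반환.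
--     return col_bingo
-- ===== SOURCE B (Python) =====
-- def col_search(c_mat):
--     # Build a per-column count table in one row-major pass, then count columns with 5 marks.
--     n = len(c_mat)
--     counts = [0] * n
--     for r in range(n):
--         row = c_mat[r]
--         counts = [cnt + (row[c] == -1) for c, cnt in enumerate(counts)]
--     return sum(1 for x in counts if x == 5)
-- ===== Notes on version B (the rewrite author's own statement) =====
-- stated objective: alternative
-- what changed: Replaces the column-by-column rescan (inner loop over rows per column) with a single row-major pass that builds a per-column count table, followed by a separate scan counting columns whose count equals 5.
import Mathlib
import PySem

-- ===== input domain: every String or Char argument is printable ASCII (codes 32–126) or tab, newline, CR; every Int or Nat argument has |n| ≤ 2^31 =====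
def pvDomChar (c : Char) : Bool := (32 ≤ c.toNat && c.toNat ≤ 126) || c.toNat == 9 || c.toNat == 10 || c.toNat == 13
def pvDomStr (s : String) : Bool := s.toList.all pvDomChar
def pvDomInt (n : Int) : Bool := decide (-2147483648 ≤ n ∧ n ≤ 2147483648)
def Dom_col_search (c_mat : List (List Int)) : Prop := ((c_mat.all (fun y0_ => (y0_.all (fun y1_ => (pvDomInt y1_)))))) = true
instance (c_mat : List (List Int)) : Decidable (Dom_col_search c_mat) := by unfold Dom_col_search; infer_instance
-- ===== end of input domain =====

-- B builds a per-column count table in one row-major pass then scans it, instead of A's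
-- column-by-column rescan; same O(n^2) cost ("alternative" decomposition), equal return value.


-- ===== PORT A =====
def col_search (c_mat : List (List Int)) : Int :=
  let n : Int := (c_mat.length : Int)
  (PySem.List.pyRange 0 n 1).foldl (fun col_bingo c =>
    let col_cnt := (PySem.List.pyRange 0 n 1).foldl (fun col_cnt cr =>
      if PySem.List.pyGetD (PySem.List.pyGetD c_mat cr []) c 0 == -1 then col_cnt + 1 else col_cnt) (0 : Int)
    if col_cnt == 5 then col_bingo + 1 else col_bingo) 0

-- ===== PORT B =====
def col_search_alt (c_mat : List (List Int)) : Int :=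
  let n := c_mat.length
  let counts0 : List Int := List.replicate n 0
  let counts := (PySem.List.pyRange 0 (n : Int) 1).foldl (fun counts r =>
    let row := PySem.List.pyGetD c_mat r []
    (PySem.List.enumerate counts).map (fun p =>
      p.2 + (if PySem.List.pyGetD row p.1 0 == -1 then 1 else 0))) counts0
  counts.foldl (fun s x => if x == 5 then s + 1 else s) 0

-- ===== PRECONDITION & SPEC =====
-- Pre_ excludes exactly the inputs where Python A raises IndexError: a row shorter than the
-- number of rows (the column index runs over range(len(c_mat))).
def Pre_col_search (c_mat : List (List Int)) : Prop :=
  (c_mat.all (fun row => Nat.ble c_mat.length row.length)) = true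
instance (c_mat : List (List Int)) : Decidable (Pre_col_search c_mat) := by unfold Pre_col_search; infer_instance

def pvWitness_col_search : List (List Int) := [[-1, -1], [-1, 0]]

def Spec_col_search (c_mat : List (List Int)) (out : Int) : Prop := out = col_search_alt c_mat
instance (c_mat : List (List Int)) (out : Int) : Decidable (Spec_col_search c_mat out) := by unfold Spec_col_search; infer_instance

-- ===== CLAIM (what is proved, stated in full; the proofs are below) =====
def Claim_equal_col_search : Prop := ∀ (c_mat : List (List Int)), Dom_col_search c_mat → Pre_col_search c_mat → Spec_col_search c_mat (col_search c_mat)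

-- ===== LEMMAS AND PROOFS =====

-- mark indicator: 1 iff c_mat[r][c] == -1 (via the total pyGetD both ports use)
def pvInd (c_mat : List (List Int)) (r c : Int) : Int :=
  if PySem.List.pyGetD (PySem.List.pyGetD c_mat r []) c 0 == -1 then 1 else 0

lemma enum_map_range (h : Nat → Int) (n : Nat) :
    PySem.List.enumerate ((List.range n).map h) 0
      = (List.range n).map (fun i : Nat => ((i : Int), h i)) := by
  apply List.ext_getElem
  · simp [PySem.List.length_enumerate]
  · intro k h1 h2
    simp [PySem.List.getElem_enumerate]

-- the table built by B's row loop is the per-column count map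
lemma tbl (m : List (List Int)) (rs : List Int) (n : Nat) (h : Nat → Int) :
    rs.foldl (fun counts r =>
        (PySem.List.enumerate counts).map (fun p => p.2 + pvInd m r p.1))
      ((List.range n).map h)
      = (List.range n).map (fun i : Nat => h i + (rs.map (fun r => pvInd m r (i : Int))).sum) := by
  induction rs generalizing h with
  | nil => simp
  | cons r rs ih =>
      simp only [List.foldl_cons, enum_map_range, List.map_map]
      have : ((fun p : Int × Int => p.2 + pvInd m r p.1) ∘ fun i : Nat => ((i : Int), h i))
          = fun i : Nat => h i + pvInd m r (i : Int) := rfl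
      rw [this, ih]
      refine List.map_congr_left (fun i _ => ?_)
      simp [add_assoc]

-- per-column count of -1 marks over all rows
def pvColCnt (m : List (List Int)) (c : Nat) : Int :=
  ((List.range m.length).map (fun r : Nat => pvInd m (r : Int) (c : Int))).sum

lemma range_cast (n : Nat) :
    PySem.List.pyRange 0 (n : Int) 1 = (List.range n).map (fun k : Nat => (k : Int)) := by
  simp [PySem.List.pyRange_one]

lemma inner_eq (m : List (List Int)) (c : Int) :
    (List.range m.length).foldl (fun cnt (r : Nat) =>
        if PySem.List.pyGetD (PySem.List.pyGetD m (r : Int) []) c 0 == -1 then cnt + 1 else cnt) 0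
      = ((List.range m.length).map (fun r : Nat => pvInd m (r : Int) c)).sum := by
  have hstep : (fun (cnt : Int) (r : Nat) =>
      if PySem.List.pyGetD (PySem.List.pyGetD m (r : Int) []) c 0 == -1 then cnt + 1 else cnt)
      = fun (cnt : Int) (r : Nat) => cnt + pvInd m (r : Int) c := by
    funext cnt r
    unfold pvInd
    split <;> simp
  rw [hstep, PySem.List.foldl_add]
  simp

lemma A_char (m : List (List Int)) :
    col_search m
      = (List.range m.length).foldl (fun b c => if pvColCnt m c == 5 then b + 1 else b) 0 := by
  unfold col_search
  simp only [range_cast, List.foldl_map]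
  congr 1
  funext b c
  exact congrArg (fun v : Int => if v == 5 then b + 1 else b) (inner_eq m (c : Int))


lemma B_char (m : List (List Int)) :
    col_search_alt m
      = ((List.range m.length).map (fun c : Nat => pvColCnt m c)).foldl
          (fun s x => if x == 5 then s + 1 else s) 0 := by
  show (((PySem.List.pyRange 0 ((m.length : Nat) : Int) 1).foldl (fun counts r =>
      (PySem.List.enumerate counts).map (fun p => p.2 + pvInd m r p.1))
      (List.replicate m.length 0)).foldl (fun s x => if x == 5 then s + 1 else s) 0) = _
  rw [show (List.replicate m.length (0 : Int))
        = (List.range m.length).map (fun _ : Nat => (0 : Int)) from by simp, tbl]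
  congr 1
  refine List.map_congr_left fun i _ => ?_
  rw [range_cast, List.map_map]
  simp only [pvColCnt, zero_add]
  rfl

theorem col_search_spec : Claim_equal_col_search := by
  intro c_mat _ _
  unfold Spec_col_search
  rw [A_char, B_char, List.foldl_map]
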